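-- pv_equiv track=rewrite | github.com/jannajchan/python | forMyKnowledge/StringIndexingAndSearching.py | second_vowel_index
-- ===== SOURCE A (Python) =====
-- def second_vowel_index(s: str) -> int:
--     if not s:
--         return -1
--
--     vowel = "aeiou"
--     count = 0
--     for i, char in enumerate(s):
--         if char.lower() in vowel:
--             count += 1
--             if count == 2:
--                 return i
--     return -1
-- ===== SOURCE B (Python) =====
-- def second_vowel_index(s: str) -> int:
--     mask = "".join("v" if c in "aeiou" else "-" for c in s.lower())
--     return mask.find("v", mask.find("v") + 1)
-- ===== Notes on version B (the rewrite author's own statement) =====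
-- stated objective: simpler
-- what changed: Instead of a counting scan with early return, B builds a mask string marking vowel positions and answers with two str.find calls (find the first 'v', then find the next 'v' after it).
import Mathlib
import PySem

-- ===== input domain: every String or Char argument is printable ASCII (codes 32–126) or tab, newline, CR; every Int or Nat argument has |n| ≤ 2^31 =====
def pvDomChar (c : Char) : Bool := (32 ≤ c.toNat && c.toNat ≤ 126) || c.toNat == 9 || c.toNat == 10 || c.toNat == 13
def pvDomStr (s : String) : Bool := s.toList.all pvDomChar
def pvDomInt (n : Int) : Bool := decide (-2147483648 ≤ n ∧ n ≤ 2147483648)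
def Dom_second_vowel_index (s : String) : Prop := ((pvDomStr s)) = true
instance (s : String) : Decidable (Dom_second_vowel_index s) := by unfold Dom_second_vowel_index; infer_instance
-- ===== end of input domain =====

-- B replaces A's counting scan with early return by building a vowel-mask string and answering with two str.find calls; objective: simpler.


-- ===== PORT A =====
-- 'c in "aeiou"' on a single char is membership among the five vowels
def pvVowelChar (c : Char) : Bool :=
  c == 'a' || c == 'e' || c == 'i' || c == 'o' || c == 'u'

-- char.lower() in "aeiou"
def pvIsVowel (c : Char) : Bool := pvVowelChar (PySem.Chars.lowerChar c)

-- the for-loop over enumerate(s) with the running counter and early return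
def pvLoopA : List (Int × Char) → Nat → Int
  | [], _ => -1
  | (i, c) :: rest, count =>
      if pvIsVowel c then
        (if count + 1 = 2 then i else pvLoopA rest (count + 1))
      else pvLoopA rest count

def second_vowel_index (s : String) : Int :=
  if s.toList = [] then -1
  else pvLoopA (PySem.List.enumerate s.toList) 0

-- ===== PORT B =====
-- mask = "".join('v' if c in "aeiou" else '-' for c in s.lower()); the join of one-char pieces is the map over the lowered chars
def pvMask (s : String) : String :=
  String.ofList ((PySem.Str.lower s).toList.map (fun c => if pvVowelChar c then 'v' else '-'))

def second_vowel_index_alt (s : String) : Int :=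
  PySem.Str.findFrom (pvMask s) "v" (PySem.Str.find (pvMask s) "v" + 1) none

-- ===== PRECONDITION & SPEC =====
def Spec_second_vowel_index (s : String) (out : Int) : Prop := out = second_vowel_index_alt s
instance (s : String) (out : Int) : Decidable (Spec_second_vowel_index s out) := by unfold Spec_second_vowel_index; infer_instance

-- ===== CLAIM (what is proved, stated in full; the proofs are below) =====
def Claim_equal_second_vowel_index : Prop := ∀ (s : String), Dom_second_vowel_index s → Spec_second_vowel_index s (second_vowel_index s)


-- ===== LEMMAS AND PROOFS =====
-- the (Int) positions of the vowels of L, in increasing order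
def pvPos (L : List Char) : List Int :=
  (PySem.List.enumerate L).filterMap (fun p => if pvIsVowel p.2 then some p.1 else none)

-- A's loop started at count = 1 returns the first remaining vowel position
theorem pvLoopA_one (l : List (Int × Char)) :
    pvLoopA l 1 = (l.filterMap (fun p => if pvIsVowel p.2 then some p.1 else none)).headD (-1) := by
  induction l with
  | nil => rfl
  | cons p rest ih =>
      obtain ⟨i, c⟩ := p
      by_cases h : pvIsVowel c <;> simp [pvLoopA, h] at ih ⊢ <;> exact ih

-- A's loop started at count = 0 returns the second vowel position
theorem pvLoopA_zero (l : List (Int × Char)) :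
    pvLoopA l 0 = (l.filterMap (fun p => if pvIsVowel p.2 then some p.1 else none)).tail.headD (-1) := by
  induction l with
  | nil => rfl
  | cons p rest ih =>
      obtain ⟨i, c⟩ := p
      by_cases h : pvIsVowel c
      · simpa [pvLoopA, h] using pvLoopA_one rest
      · simpa [pvLoopA, h] using ih

theorem pvA_eq (s : String) : second_vowel_index s = (pvPos s.toList).tail.headD (-1) := by
  unfold second_vowel_index pvPos
  by_cases hs : s.toList = []
  · simp [hs]
  · rw [if_neg hs, pvLoopA_zero]

-- the mask's characters, seen from the original string
theorem pvMask_toList (s : String) :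
    (pvMask s).toList = s.toList.map (fun c => if pvIsVowel c then 'v' else '-') := by
  unfold pvMask
  rw [String.toList_ofList, PySem.Str.toList_lower]
  show (s.toList.map PySem.Chars.lowerChar).map _ = _
  rw [List.map_map]
  rfl

-- a one-char list is a prefix of L.drop j iff L[j] is that char
theorem pvSingle_prefix_drop (L : List Char) (a : Char) (j : Nat) :
    ([a] <+: L.drop j) ↔ L[j]? = some a := by
  rw [← List.head?_drop]
  cases h : (L.drop j) with
  | nil => simp
  | cons x t => simp [List.cons_prefix_iff]

-- mask position j holds 'v' iff position j of s holds a vowel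
theorem pvMaskGet (s : String) (j : Nat) :
    ((pvMask s).toList[j]? = some 'v') ↔ ∃ h : j < s.toList.length, pvIsVowel s.toList[j] := by
  rw [pvMask_toList, List.getElem?_map]
  constructor
  · intro hv
    rcases Option.map_eq_some_iff.mp hv with ⟨c, hc, hcv⟩
    obtain ⟨hj, hget⟩ := List.getElem?_eq_some_iff.mp hc
    refine ⟨hj, ?_⟩
    by_cases hb : pvIsVowel c
    · rw [hget]; exact hb
    · simp [hb] at hcv
  · rintro ⟨hj, hv⟩
    rw [List.getElem?_eq_getElem hj]
    simp [hv]

-- (j : Int) is in pvPos iff position j of s holds a vowel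
theorem pvPosMem (s : String) (j : Nat) :
    ((j : Int) ∈ pvPos s.toList) ↔ ∃ h : j < s.toList.length, pvIsVowel s.toList[j] := by
  unfold pvPos
  rw [List.mem_filterMap]
  constructor
  · rintro ⟨⟨i, c⟩, hmem, hval⟩
    rw [PySem.List.mem_enumerate_iff] at hmem
    rcases hmem with ⟨k, hk, hpk⟩
    have hcv : pvIsVowel c = true := by by_contra hb; simp [hb] at hval
    have hi : i = (j : Int) := by by_contra hb; simp [hcv, hb] at hval
    have h1 : i = 0 + (k : Int) := congrArg Prod.fst hpk
    have h2 : c = s.toList[k] := congrArg Prod.snd hpk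
    have hkj : k = j := by omega
    subst hkj
    exact ⟨hk, h2 ▸ hcv⟩
  · rintro ⟨hj, hv⟩
    refine ⟨((j : Int), s.toList[j]), ?_, by simp [hv]⟩
    rw [PySem.List.mem_enumerate_iff]
    exact ⟨j, hj, by simp⟩

-- 'v' is a prefix of the mask dropped at k iff (k : Int) ∈ pvPos
theorem pvVAt (s : String) (k : Nat) :
    (['v'] <+: (pvMask s).toList.drop k) ↔ ((k : Int) ∈ pvPos s.toList) := by
  rw [pvSingle_prefix_drop, pvMaskGet, pvPosMem]

-- pvPos is strictly increasing
theorem pvPos_pairwise (L : List Char) : (pvPos L).Pairwise (· < ·) := by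
  unfold pvPos
  rw [List.pairwise_filterMap]
  refine (PySem.List.pairwise_lt_enumerate L 0).imp ?_
  intro a b hab x hx y hy
  have hxa : x = a.1 := by by_cases h : pvIsVowel a.2 <;> simp [h] at hx; omega
  have hyb : y = b.1 := by by_cases h : pvIsVowel b.2 <;> simp [h] at hy; omega
  rw [hxa, hyb]; exact hab

-- every member of pvPos is a natural number below the length
theorem pvPos_mem_nonneg (L : List Char) (j : Int) (h : j ∈ pvPos L) :
    0 ≤ j ∧ j.toNat < L.length := by
  unfold pvPos at h
  rw [List.mem_filterMap] at h
  rcases h with ⟨⟨i, c⟩, hmem, hval⟩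
  rw [PySem.List.mem_enumerate_iff] at hmem
  rcases hmem with ⟨k, hk, hpk⟩
  have hcv : pvIsVowel c = true := by by_contra hb; simp [hb] at hval
  have hi : i = j := by by_contra hb; simp [hcv, hb] at hval
  have h1 : i = 0 + (k : Int) := congrArg Prod.fst hpk
  omega

-- find on the mask returns the head of pvPos
theorem pvFind_eq_head (s : String) :
    PySem.Chars.find (pvMask s).toList ['v'] = (pvPos s.toList).headD (-1) := by
  cases hP : pvPos s.toList with
  | nil =>
      simp only [List.headD_nil]
      rw [PySem.Chars.find_eq_neg_one_iff]
      intro hinf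
      have hin : PySem.Chars.isIn ['v'] (pvMask s).toList = true :=
        (PySem.Chars.isIn_iff_infix _ _).mpr hinf
      rcases (PySem.Chars.exists_prefix_drop_iff_isIn _ _).mpr hin with ⟨j, hj⟩
      have := (pvVAt s j).mp hj
      rw [hP] at this; simp at this
  | cons p t =>
      have hpmem : p ∈ pvPos s.toList := by rw [hP]; exact List.mem_cons_self
      obtain ⟨hp0, hplen⟩ := pvPos_mem_nonneg _ _ hpmem
      have hppre : ['v'] <+: (pvMask s).toList.drop p.toNat := by
        rw [pvVAt]
        simpa [Int.toNat_of_nonneg hp0] using hpmem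
      have hfnn : 0 ≤ PySem.Chars.find (pvMask s).toList ['v'] := by
        rw [PySem.Chars.find_nonneg_iff]
        exact List.infix_iff_prefix_suffix.mpr ⟨_, hppre, List.drop_suffix _ _⟩
      obtain ⟨hfpre, hfmin⟩ := PySem.Chars.find_spec hfnn
      set f := PySem.Chars.find (pvMask s).toList ['v'] with hf
      have hfP : (f.toNat : Int) ∈ pvPos s.toList := (pvVAt s f.toNat).mp hfpre
      have hple : p ≤ (f.toNat : Int) := by
        rw [hP] at hfP
        rcases List.mem_cons.mp hfP with h | h
        · omega
        · have := (List.pairwise_cons.mp (hP ▸ pvPos_pairwise s.toList)).1 _ h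
          omega
      have hfle : ¬ p.toNat < f.toNat := fun hlt => hfmin _ hlt hppre
      simp only [List.headD_cons]
      omega

-- findFrom on the mask from just past the first vowel returns the second vowel position
theorem pvFindFrom_succ (s : String) (p : Int) (t : List Int)
    (hP : pvPos s.toList = p :: t) :
    PySem.Chars.findFrom (pvMask s).toList ['v'] (p + 1) none = t.headD (-1) := by
  have hpmem : p ∈ pvPos s.toList := by rw [hP]; exact List.mem_cons_self
  obtain ⟨hp0, hplen⟩ := pvPos_mem_nonneg _ _ hpmem
  have hlenmask : (pvMask s).toList.length = s.toList.length := by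
    rw [pvMask_toList]; simp
  have hcast : p + 1 = ((p.toNat + 1 : Nat) : Int) := by omega
  have hble : p.toNat + 1 ≤ (pvMask s).toList.length := by omega
  rw [hcast, PySem.Chars.findFrom_natCast _ _ _ hble]
  have hdropV : ∀ j : Nat, (['v'] <+: ((pvMask s).toList.drop (p.toNat + 1)).drop j) ↔
      ((p.toNat + 1 + j : Nat) : Int) ∈ pvPos s.toList := by
    intro j
    rw [List.drop_drop, pvVAt]
  cases ht : t with
  | nil =>
      have hnone : PySem.Chars.find ((pvMask s).toList.drop (p.toNat + 1)) ['v'] = -1 := by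
        rw [PySem.Chars.find_eq_neg_one_iff]
        intro hinf
        have hin : PySem.Chars.isIn ['v'] ((pvMask s).toList.drop (p.toNat + 1)) = true :=
          (PySem.Chars.isIn_iff_infix _ _).mpr hinf
        rcases (PySem.Chars.exists_prefix_drop_iff_isIn _ _).mpr hin with ⟨j, hj⟩
        have hmem := (hdropV j).mp hj
        rw [hP, ht] at hmem
        rcases List.mem_cons.mp hmem with h | h
        · omega
        · simp at h
      simp [hnone]
  | cons q t' =>
      have hqmem : q ∈ pvPos s.toList := by
        rw [hP, ht]; exact List.mem_cons_of_mem _ List.mem_cons_self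
      obtain ⟨hq0, hqlen⟩ := pvPos_mem_nonneg _ _ hqmem
      have hpq : p < q :=
        (List.pairwise_cons.mp (hP ▸ pvPos_pairwise s.toList)).1 q
          (by rw [ht]; exact List.mem_cons_self)
      have hqpre : ['v'] <+: ((pvMask s).toList.drop (p.toNat + 1)).drop (q.toNat - (p.toNat + 1)) := by
        rw [hdropV]
        have heq : ((p.toNat + 1 + (q.toNat - (p.toNat + 1)) : Nat) : Int) = q := by omega
        rw [heq]; exact hqmem
      have hfnn : 0 ≤ PySem.Chars.find ((pvMask s).toList.drop (p.toNat + 1)) ['v'] := by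
        rw [PySem.Chars.find_nonneg_iff]
        exact List.infix_iff_prefix_suffix.mpr ⟨_, hqpre, List.drop_suffix _ _⟩
      obtain ⟨hfpre, hfmin⟩ := PySem.Chars.find_spec hfnn
      set f := PySem.Chars.find ((pvMask s).toList.drop (p.toNat + 1)) ['v'] with hf
      have hfP : ((p.toNat + 1 + f.toNat : Nat) : Int) ∈ pvPos s.toList := (hdropV f.toNat).mp hfpre
      have hqle : q ≤ ((p.toNat + 1 + f.toNat : Nat) : Int) := by
        have hpw := pvPos_pairwise s.toList
        rw [hP, ht] at hpw
        have h2 := List.pairwise_cons.mp (List.pairwise_cons.mp hpw).2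
        rw [hP, ht] at hfP
        rcases List.mem_cons.mp hfP with h | h
        · omega
        · rcases List.mem_cons.mp h with h' | h'
          · omega
          · have := h2.1 _ h'
            omega
      have hfle : ¬ (q.toNat - (p.toNat + 1)) < f.toNat := fun hlt => hfmin _ hlt hqpre
      simp only [List.headD_cons]
      have hfq : f = q - (p + 1) := by omega
      rw [if_neg (by omega), hfq]
      omega

theorem pvB_eq (s : String) : second_vowel_index_alt s = (pvPos s.toList).tail.headD (-1) := by
  unfold second_vowel_index_alt
  rw [PySem.Str.findFrom_eq, PySem.Str.find_eq]
  show PySem.Chars.findFrom (pvMask s).toList ['v'] (PySem.Chars.find (pvMask s).toList ['v'] + 1) none = _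
  rw [pvFind_eq_head]
  cases hP : pvPos s.toList with
  | nil =>
      simp only [List.headD_nil, List.tail_nil]
      have h0 : ((-1 : Int) + 1) = ((0 : Nat) : Int) := by norm_num
      rw [h0, PySem.Chars.findFrom_natCast _ _ _ (Nat.zero_le _)]
      have hfind : PySem.Chars.find (pvMask s).toList ['v'] = -1 := by
        rw [pvFind_eq_head, hP]; rfl
      simp [hfind]
  | cons p t =>
      simp only [List.headD_cons, List.tail_cons]
      exact pvFindFrom_succ s p t hP

-- ===== VERDICT (by name: the statement is the Claim_ definition above) =====
theorem second_vowel_index_spec : Claim_equal_second_vowel_index := by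
  intro s _
  unfold Spec_second_vowel_index
  rw [pvA_eq, pvB_eq]
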